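-- pv_equiv track=rewrite | github.com/jtiosue/qubovert | qubovert/utils/_solve_bruteforce.py | decimal_to_boolean
-- ===== SOURCE A (Python) =====
-- def decimal_to_boolean(d, num_bits=None):
--     """decimal_to_boolean.
--
--     Convert the integer ``d`` to its boolean representation.
--
--     Parameters
--     ----------
--     d : int >= 0.
--         Number to convert to binary.
--     num_bits : int >= 0 (optional, defaults to None).
--         Number of bits in the representation. If ``num_bits is None``, then
--         the minimum number of bits required will be used.
--
--     Returns
--     -------
--     b : tuple of length ``num_bits``.
--         Each element of ``b`` is a 0 or 1.
--
--     Example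
--     -------
--     >>> decimal_to_boolean(10, 7)
--     (0, 0, 0, 1, 0, 1, 0)
--
--     >>> decimal_to_boolean(10)
--     (1, 0, 1, 0)
--
--     """
--     if int(d) != d or d < 0:
--         raise ValueError("``d`` must be an integer >- 0.")
--     b = bin(d)[2:]
--     lb = len(b)
--     if num_bits is None:
--         num_bits = lb
--     elif num_bits < lb:
--         raise ValueError("Not enough bits to represent the number.")
--     return (0,) * (num_bits - lb) + tuple(int(x) for x in b)
-- ===== SOURCE B (Python) =====
-- def decimal_to_boolean(d, num_bits=None):
--     if int(d) != d or d < 0: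
--         raise ValueError("``d`` must be an integer >- 0.")
--     lb = max(d.bit_length(), 1)
--     if num_bits is None:
--         num_bits = lb
--     elif num_bits < lb:
--         raise ValueError("Not enough bits to represent the number.")
--     return tuple((d >> (num_bits - 1 - i)) & 1 for i in range(num_bits))
-- ===== Notes on version B (the rewrite author's own statement) =====
-- stated objective: alternative
-- what changed: Replaces bin()-string formatting, slicing, per-character int() parsing and tuple padding with pure arithmetic: width from d.bit_length() and each bit extracted by shift-and-mask.
import Mathlib
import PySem

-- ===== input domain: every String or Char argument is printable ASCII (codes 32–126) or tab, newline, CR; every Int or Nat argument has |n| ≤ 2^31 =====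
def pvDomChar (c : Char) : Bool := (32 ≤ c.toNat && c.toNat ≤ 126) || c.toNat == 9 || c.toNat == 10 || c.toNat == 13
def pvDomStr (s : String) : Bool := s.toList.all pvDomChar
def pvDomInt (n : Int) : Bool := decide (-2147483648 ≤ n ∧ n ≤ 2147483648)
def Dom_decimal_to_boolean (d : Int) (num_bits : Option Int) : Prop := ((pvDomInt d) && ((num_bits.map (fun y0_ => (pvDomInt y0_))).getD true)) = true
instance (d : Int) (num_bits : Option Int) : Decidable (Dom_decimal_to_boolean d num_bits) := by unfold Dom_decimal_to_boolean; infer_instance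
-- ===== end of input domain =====

-- B replaces A's bin()-string formatting and padding with arithmetic bit extraction (shift and mask); same cost, no string parsing.


-- ===== PORT A =====
-- bin(n)[2:] for n > 0, digit by digit (msb first); binDigs 0 = [] (bin handles 0 via the `if d = 0` in the port)
def binDigs (n : Nat) : List Int :=
  if h : n = 0 then [] else binDigs (n / 2) ++ [Int.ofNat (n % 2)]
  decreasing_by exact Nat.div_lt_self (Nat.pos_of_ne_zero h) (by omega)

def decimal_to_boolean (d : Int) (num_bits : Option Int) : List Int :=
  if d < 0 then []  -- ValueError in Python; excluded by Pre_
  else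
    let b : List Int := if d = 0 then [0] else binDigs d.toNat
    let lb : Int := Int.ofNat b.length
    let nb : Int := num_bits.getD lb
    if nb < lb then []  -- ValueError in Python; excluded by Pre_
    else List.replicate (nb - lb).toNat 0 ++ b

-- ===== PORT B =====
def decimal_to_boolean_alt (d : Int) (num_bits : Option Int) : List Int :=
  if d < 0 then []  -- ValueError in Python; excluded by Pre_
  else
    let lb : Int := max (Int.ofNat (PySem.Int.bitLength d)) 1
    let nb : Int := num_bits.getD lb
    if nb < lb then []  -- ValueError in Python; excluded by Pre_
    else (PySem.List.pyRange 0 nb 1).map (fun i => PySem.Int.band (d >>> (nb - 1 - i).toNat) 1)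

-- ===== PRECONDITION & SPEC =====
-- Pre_ excludes exactly the inputs on which Python A raises ValueError: d < 0, or num_bits given but
-- smaller than the minimal width len(bin(d)[2:]) = max(d.bit_length(), 1).
def Pre_decimal_to_boolean (d : Int) (num_bits : Option Int) : Prop :=
  0 ≤ d ∧ max (Int.ofNat (PySem.Int.bitLength d)) 1 ≤ num_bits.getD (max (Int.ofNat (PySem.Int.bitLength d)) 1)
instance (d : Int) (num_bits : Option Int) : Decidable (Pre_decimal_to_boolean d num_bits) := by unfold Pre_decimal_to_boolean; infer_instance

def pvWitness_decimal_to_boolean : Int × Option Int := (10, some 7)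

def Spec_decimal_to_boolean (d : Int) (num_bits : Option Int) (out : List Int) : Prop := out = decimal_to_boolean_alt d num_bits
instance (d : Int) (num_bits : Option Int) (out : List Int) : Decidable (Spec_decimal_to_boolean d num_bits out) := by unfold Spec_decimal_to_boolean; infer_instance

-- ===== CLAIM (what is proved, stated in full; the proofs are below) =====
def Claim_equal_decimal_to_boolean : Prop := ∀ (d : Int) (num_bits : Option Int), Dom_decimal_to_boolean d num_bits → Pre_decimal_to_boolean d num_bits → Spec_decimal_to_boolean d num_bits (decimal_to_boolean d num_bits)

-- ===== LEMMAS AND PROOFS =====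

theorem binDigs_zero : binDigs 0 = [] := by rw [binDigs]; simp

theorem binDigs_ne (n : Nat) (h : n ≠ 0) :
    binDigs n = binDigs (n / 2) ++ [Int.ofNat (n % 2)] := by
  rw [binDigs]; simp [h]

theorem binDigs_len : ∀ n : Nat, n ≠ 0 → (binDigs n).length = PySem.Int.bitLength (n : Int) := by
  intro n
  induction n using Nat.strong_induction_on with
  | _ n ih =>
    intro h
    rw [binDigs_ne n h, PySem.Int.bitLength_natCast (Nat.pos_of_ne_zero h)]
    simp only [List.length_append, List.length_cons, List.length_nil]
    by_cases h2 : n / 2 = 0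
    · simp [h2, binDigs_zero, PySem.Int.bitLength_zero]
    · rw [ih (n / 2) (Nat.div_lt_self (Nat.pos_of_ne_zero h) one_lt_two) h2]

theorem shift_succ (n k : Nat) : n >>> (k + 1) = (n / 2) >>> k := by
  rw [Nat.shiftRight_eq_div_pow, Nat.shiftRight_eq_div_pow, Nat.div_div_eq_div_mul]
  rw [pow_succ']

-- core: arithmetic bit extraction equals zero-padded msb-first binary digits, for n < 2^w
theorem pad_eq : ∀ (w n : Nat), n < 2 ^ w →
    (List.range w).map (fun i => Int.ofNat ((n >>> (w - 1 - i)) % 2)) =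
      List.replicate (w - (binDigs n).length) 0 ++ binDigs n := by
  intro w
  induction w with
  | zero =>
    intro n h
    interval_cases n
    simp [binDigs_zero]
  | succ w ih =>
    intro n h
    rw [List.range_succ, List.map_append]
    have hstep : (List.range w).map (fun i => Int.ofNat ((n >>> (w + 1 - 1 - i)) % 2)) =
        (List.range w).map (fun i => Int.ofNat (((n / 2) >>> (w - 1 - i)) % 2)) := by
      apply List.map_congr_left
      intro i hi
      have hi' := List.mem_range.mp hi
      have he : w + 1 - 1 - i = (w - 1 - i) + 1 := by omega
      rw [he, shift_succ]
    have h2 : n / 2 < 2 ^ w := by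
      have := Nat.pow_succ 2 w
      omega
    rw [hstep, ih (n / 2) h2]
    simp only [List.map_cons, List.map_nil, Nat.add_sub_cancel, Nat.sub_self,
      Nat.shiftRight_zero]
    by_cases hn : n = 0
    · subst hn
      simp [binDigs_zero, List.replicate_succ' (n := w)]
    · rw [binDigs_ne n hn]
      have hlen : (binDigs (n / 2) ++ [Int.ofNat (n % 2)]).length =
          (binDigs (n / 2)).length + 1 := by simp
      rw [hlen, Nat.succ_sub_succ, List.append_assoc]

theorem bitLength_pos (n : Nat) (h : n ≠ 0) : 0 < PySem.Int.bitLength (n : Int) := by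
  rw [PySem.Int.bitLength_natCast (Nat.pos_of_ne_zero h)]; omega

-- ===== VERDICT (by name: the statement is the Claim_ definition above) =====
theorem decimal_to_boolean_spec : Claim_equal_decimal_to_boolean := by
  intro d num_bits _ hpre
  obtain ⟨hd, hle⟩ := hpre
  unfold Spec_decimal_to_boolean
  have hnotlt : ¬ d < 0 := by omega
  simp only [decimal_to_boolean, decimal_to_boolean_alt, if_neg hnotlt,
    Int.ofNat_eq_natCast]
  set n := d.toNat with hn
  have hdn : d = (n : Int) := (Int.toNat_of_nonneg hd).symm
  set b : List Int := if d = 0 then [0] else binDigs n with hb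
  set L : Int := max ((PySem.Int.bitLength d : Nat) : Int) 1 with hLdef
  have hle' : L ≤ num_bits.getD L := by
    simpa only [Int.ofNat_eq_natCast] using hle
  have hblen : (b.length : Int) = L := by
    by_cases h0 : d = 0
    · have hn0 : n = 0 := by omega
      rw [hLdef, h0]
      simp [hb, h0, PySem.Int.bitLength_zero]
    · have hn0 : n ≠ 0 := by omega
      have hlen := binDigs_len n hn0
      have hpos := bitLength_pos n hn0
      rw [hLdef, hdn]
      simp only [hb, if_neg h0, hlen]
      omega
  rw [hblen]
  set nb : Int := num_bits.getD L with hnb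
  have hLnb : L ≤ nb := hle'
  have hL1 : 1 ≤ L := le_max_right _ _
  have hnlt : ¬ nb < L := by omega
  rw [if_neg hnlt, if_neg hnlt]
  set w : Nat := nb.toNat with hw
  have hwnb : nb = (w : Int) := by omega
  have hbl_le : PySem.Int.bitLength d ≤ w := by
    have h1 : ((PySem.Int.bitLength d : Nat) : Int) ≤ L := le_max_left _ _
    omega
  have hsmall : n < 2 ^ w := by
    have h1 := PySem.Int.lt_two_pow_bitLength d
    have h2 : d.natAbs = n := by omega
    calc n < 2 ^ PySem.Int.bitLength d := h2 ▸ h1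
      _ ≤ 2 ^ w := Nat.pow_le_pow_right (by omega) hbl_le
  -- rewrite B's side into the range-map form
  have hB : (PySem.List.pyRange 0 nb 1).map (fun i => PySem.Int.band (d >>> (nb - 1 - i).toNat) 1) =
      (List.range w).map (fun i => Int.ofNat ((n >>> (w - 1 - i)) % 2)) := by
    rw [hwnb, PySem.List.pyRange_zero_natCast w, List.map_map]
    apply List.map_congr_left
    intro k hk
    have hk' := List.mem_range.mp hk
    have htn : ((w : Int) - 1 - (k : Int)).toNat = w - 1 - k := by omega
    simp only [Function.comp, htn]
    have hsh : (↑n : Int) >>> (w - 1 - k) = ((n >>> (w - 1 - k) : Nat) : Int) :=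
      (Int.natCast_shiftRight _ _).symm
    rw [hdn, PySem.Int.band_one, PySem.Int.mod_eq_emod_of_pos (by norm_num), hsh]
    simp only [Int.ofNat_eq_natCast]
    push_cast
    omega
  rw [hB, pad_eq w n hsmall]
  by_cases h0 : d = 0
  · have hn0 : n = 0 := by omega
    have hbitz : PySem.Int.bitLength d = 0 := by rw [h0]; exact PySem.Int.bitLength_zero
    have hLv : L = 1 := by rw [hLdef, hbitz]; simp
    have hcount : (nb - L).toNat = w - 1 := by omega
    have hrep : List.replicate (w - (binDigs n).length) (0:Int) ++ binDigs n
        = List.replicate ((nb - L).toNat) 0 ++ [0] := by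
      rw [hn0, binDigs_zero, hcount]
      simp only [List.length_nil, Nat.sub_zero, List.append_nil]
      conv_lhs => rw [show w = (w - 1) + 1 from by omega]
      rw [List.replicate_succ']
    rw [hrep]
    simp [hb, h0]
  · have hn0 : n ≠ 0 := by omega
    simp only [hb, if_neg h0]
    have hlen2 : ((binDigs n).length : Int) = L := by
      rw [← hblen]; simp [hb, if_neg h0]
    have hcount : (nb - L).toNat = w - (binDigs n).length := by omega
    rw [hcount]
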